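-- pv_equiv track=rewrite | github.com/williamzhangNU/VAGEN | vagen/inference/utils/visualization.py | squash_exp_logs
-- ===== SOURCE A (Python) =====
-- from typing import List, Dict, Any
--
-- def squash_exp_logs(exp_log: List[Dict]) -> List[Dict]:
-- 	merged = []
-- 	it = iter(exp_log)
-- 	for first in it:
-- 		try:
-- 			second = next(it)
-- 			merged.append({**first, **second})
-- 		except StopIteration:
-- 			merged.append(first)
-- 	return merged
-- ===== SOURCE B (Python) =====
-- def squash_exp_logs(exp_log):
-- 	evens = exp_log[::2]
-- 	odds = exp_log[1::2]
-- 	merged = [{**a, **b} for a, b in zip(evens, odds)]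
-- 	if len(evens) > len(odds):
-- 		merged.append(evens[-1])
-- 	return merged
-- ===== Notes on version B (the rewrite author's own statement) =====
-- stated objective: idiomatic
-- what changed: Replaces the iterator loop with next() and StopIteration handling by slicing the list into even/odd positions, merging parallel pairs with zip, and appending the unpaired trailing element when the length is odd.
import Mathlib
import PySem

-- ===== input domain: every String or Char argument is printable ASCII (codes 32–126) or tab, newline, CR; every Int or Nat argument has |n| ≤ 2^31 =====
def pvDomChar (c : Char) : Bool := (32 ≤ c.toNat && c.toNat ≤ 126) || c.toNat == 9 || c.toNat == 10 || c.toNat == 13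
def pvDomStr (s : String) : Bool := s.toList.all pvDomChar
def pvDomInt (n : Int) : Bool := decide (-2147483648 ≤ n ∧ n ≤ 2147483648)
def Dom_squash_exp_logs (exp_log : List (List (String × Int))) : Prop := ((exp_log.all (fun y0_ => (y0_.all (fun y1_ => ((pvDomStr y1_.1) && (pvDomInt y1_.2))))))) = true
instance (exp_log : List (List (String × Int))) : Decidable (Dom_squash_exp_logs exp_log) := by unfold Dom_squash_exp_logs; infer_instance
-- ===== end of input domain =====

-- B (slicing + zip) replaces A's iterator loop with next()/StopIteration handling; same cost, more idiomatic.

-- {**first, **second}: start from first's entries, insert each of second's (overwrite in place).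
-- Used by both ports since both Pythons contain this very expression.
def mergeDict (a b : List (String × Int)) : List (String × Int) :=
  (b.foldl (fun d kv => d.insert kv.1 kv.2) (PySem.Dict.mk a)).items

-- ===== PORT A =====
-- A's iterator loop pairs the elements two at a time; a StopIteration on `next`
-- (odd length) appends the unpaired `first`. Transliterated as two-step recursion.
def squash_exp_logs (exp_log : List (List (String × Int))) : List (List (String × Int)) :=
  match exp_log with
  | [] => []
  | [first] => [first]
  | first :: second :: rest => mergeDict first second :: squash_exp_logs rest

-- ===== PORT B =====
-- evens = exp_log[::2]; odds = exp_log[1::2]; zip-merge; append evens[-1] if odd length.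
def squash_exp_logs_alt (exp_log : List (List (String × Int))) : List (List (String × Int)) :=
  let evens := (PySem.List.slice? exp_log none none 2).getD []
  let odds := (PySem.List.slice? exp_log (some 1) none 2).getD []
  let merged := (evens.zip odds).map (fun p => mergeDict p.1 p.2)
  if odds.length < evens.length then
    match PySem.List.pyGet? evens (-1) with
    | some x => merged ++ [x]
    | none => merged
  else merged

-- ===== PRECONDITION & SPEC =====
def Spec_squash_exp_logs (exp_log : List (List (String × Int))) (out : List (List (String × Int))) : Prop := out = squash_exp_logs_alt exp_log
instance (exp_log : List (List (String × Int))) (out : List (List (String × Int))) : Decidable (Spec_squash_exp_logs exp_log out) := by unfold Spec_squash_exp_logs; infer_instance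

-- ===== CLAIM (what is proved, stated in full; the proofs are below) =====
def Claim_equal_squash_exp_logs : Prop := ∀ (exp_log : List (List (String × Int))), Dom_squash_exp_logs exp_log → Spec_squash_exp_logs exp_log (squash_exp_logs exp_log)

-- ===== LEMMAS AND PROOFS =====

-- xs[::2] never raises (step ≠ 0)
theorem slice2_isSome {α : Type} (xs : List α) (s? : Option Int) :
    ∃ l, PySem.List.slice? xs s? none 2 = some l := by
  simp [PySem.List.slice?]

theorem evens_nil : PySem.List.slice? ([] : List (List (String × Int))) none none 2 = some [] := by
  simp [PySem.List.slice?, PySem.List.sliceIndices]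

theorem evens_single (a : List (String × Int)) :
    PySem.List.slice? [a] none none 2 = some [a] := by
  simp [PySem.List.slice?, PySem.List.sliceIndices]

theorem odds_nil : PySem.List.slice? ([] : List (List (String × Int))) (some 1) none 2 = some [] := by
  simp [PySem.List.slice?, PySem.List.sliceIndices]

theorem odds_single (a : List (String × Int)) :
    PySem.List.slice? [a] (some 1) none 2 = some [] := by
  simp [PySem.List.slice?, PySem.List.sliceIndices]

theorem evens_cons_cons (a b : List (String × Int)) (rest : List (List (String × Int))) :
    PySem.List.slice? (a :: b :: rest) none none 2
      = (PySem.List.slice? rest none none 2).map (a :: ·) := by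
  simp only [PySem.List.slice?, PySem.List.sliceIndices]
  norm_num
  have hC : (((rest.length:Int)+1+1+2-1)/2).toNat
      = (if 0 < rest.length then (((rest.length:Int)+2-1)/2).toNat else 0) + 1 := by
    split_ifs <;> omega
  rw [hC, if_pos (show (0:Int) ≤ (rest.length:Int) + 1 by positivity), List.range_succ_eq_map,
    List.filterMap_cons, List.filterMap_map]
  norm_num
  apply List.filterMap_congr
  intro x _
  have h2 : ((2:Int)*((x:Int)+1)).toNat = ((2:Int)*(x:Int)).toNat + 2 := by omega
  simp only [h2]
  simp [List.getElem?_cons_succ]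

theorem odds_cons_cons (a b : List (String × Int)) (rest : List (List (String × Int))) :
    PySem.List.slice? (a :: b :: rest) (some 1) none 2
      = (PySem.List.slice? rest (some 1) none 2).map (b :: ·) := by
  simp only [PySem.List.slice?, PySem.List.sliceIndices]
  norm_num
  have hmin : min (1:Int) ((rest.length:Int) + 1 + 1) = 1 := by omega
  rw [hmin]
  have hC : (((rest.length:Int) + 1 + 1 - 1 + 2 - 1)/2).toNat
      = (if 1 < rest.length then (((rest.length:Int) - min 1 (rest.length:Int) + 2 - 1)/2).toNat else 0) + 1 := by
    split_ifs <;> omega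
  rw [hC, List.range_succ_eq_map, List.filterMap_cons, List.filterMap_map]
  norm_num
  apply List.filterMap_congr
  intro x hx
  have hlen : 1 < rest.length := by
    by_contra h
    simp [if_neg h] at hx
  have hmin2 : min (1:Int) ((rest.length:Int)) = 1 := by omega
  have h2 : ((1:Int)+2*((x:Int)+1)).toNat = ((1:Int)+2*(x:Int)).toNat + 2 := by omega
  simp only [hmin2, h2]
  simp [List.getElem?_cons_succ]

-- xs[-1] on a cons cell with nonempty tail reads the tail's last element
theorem pyGet_neg_one_cons (a : List (String × Int)) (l : List (List (String × Int))) (h : l ≠ []) :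
    PySem.List.pyGet? (a::l) (-1) = PySem.List.pyGet? l (-1) := by
  have hl : 0 < l.length := List.length_pos_iff.mpr h
  simp only [PySem.List.pyGet?, PySem.List.pyIdx?, Int.reduceNeg, Int.neg_nonneg, Int.reduceLE, ↓reduceIte,
    List.length_cons, Nat.cast_add, Nat.cast_one, neg_add_rev, add_le_iff_nonpos_right, Left.neg_nonpos_iff,
    Nat.cast_nonneg, neg_neg, Int.toNat_one, add_tsub_cancel_right, Option.bind_some, lt_add_iff_pos_right,
    Order.lt_one_iff, getElem?_pos, neg_le_neg_iff, Nat.one_le_cast]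
  rw [if_pos (by omega)]
  simp only [Option.bind_some]
  obtain ⟨n, hn⟩ : ∃ n, l.length = n+1 := ⟨l.length-1, by omega⟩
  simp [hn]

theorem alt_cons_cons (a b : List (String × Int)) (rest : List (List (String × Int))) :
    squash_exp_logs_alt (a :: b :: rest) = mergeDict a b :: squash_exp_logs_alt rest := by
  obtain ⟨E, hE⟩ := slice2_isSome rest none
  obtain ⟨O, hO⟩ := slice2_isSome rest (some 1)
  unfold squash_exp_logs_alt
  rw [evens_cons_cons, odds_cons_cons, hE, hO]
  simp only [Option.map_some, Option.getD_some, List.zip_cons_cons, List.map_cons, List.length_cons]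
  by_cases h : O.length < E.length
  · rw [if_pos (by omega), if_pos h]
    have hEne : E ≠ [] := by
      intro hnil; subst hnil; simp at h
    rw [pyGet_neg_one_cons a E hEne]
    cases hx : PySem.List.pyGet? E (-1) <;> simp
  · rw [if_neg (by omega), if_neg h]

theorem squash_eq_alt (exp_log : List (List (String × Int))) :
    squash_exp_logs exp_log = squash_exp_logs_alt exp_log := by
  match exp_log with
  | [] => simp [squash_exp_logs, squash_exp_logs_alt, evens_nil, odds_nil]
  | [a] => simp [squash_exp_logs, squash_exp_logs_alt, evens_single, odds_single, PySem.List.pyGet?, PySem.List.pyIdx?]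
  | a :: b :: rest =>
    rw [squash_exp_logs, alt_cons_cons, squash_eq_alt rest]

-- ===== VERDICT (by name: the statement is the Claim_ definition above) =====
theorem squash_exp_logs_spec : Claim_equal_squash_exp_logs := by
  intro exp_log _
  unfold Spec_squash_exp_logs
  exact squash_eq_alt exp_log
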